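-- pv_equiv track=rewrite | github.com/miliar/Code_Jam_Webscraper | solutions_python/Problem_201/175.py | stall_wars
-- ===== SOURCE A (Python) =====
-- def stall_wars(n, k):
--     # range is odd -> two equal subproblems, consider ppl in batches of 2
--     #  because subproblems are equivalent, left side will be filled first
--     # range is even -> two subproblems size a and a+1,
--     #  right side is filled first, then left
--     #  result will be 1 even subproblem and 1 odd subproblem,
--     #  order depends on a.
--
--     if n % 2 == 0:
--         left_space = (n // 2) - 1
--         right_space = (n // 2)
--         if k == 1:
--             return (right_space, left_space)
--         else:
--             # You're going to fill the right side and then the left side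
--             # in an alternating fashion for the rest of the k ppl.
--             # We can figure out what side it is using modulo,
--             # then solve only that subproblem.
--             k -= 1 # place the middle person
--             if k % 2 == 0: # left side
--                 return stall_wars(left_space, k // 2)
--             else: # right side
--                 return stall_wars(right_space, (k + 1) // 2)
--     else:
--         subproblem_size = (n - 1) // 2
--         if k == 1:
--             return (subproblem_size, subproblem_size)
--         else:
--             k -= 1 # place the middle person
--             new_k = ((k - 1) // 2) + 1 # 1 and 2 same, 3 and 4 same, etc.
--             return stall_wars(subproblem_size, new_k)
-- ===== SOURCE B (Python) =====
-- def stall_wars(n, k):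
--     # Simpler iterative form: unified base case and direct parity on the
--     # current k (no "place the middle person" decrement bookkeeping).
--     while k != 1:
--         if n % 2 == 0:
--             if k % 2:  # original k odd -> left (smaller) side
--                 n, k = n // 2 - 1, (k - 1) // 2
--             else:      # original k even -> right (larger) side
--                 n, k = n // 2, k // 2
--         else:
--             n, k = (n - 1) // 2, k // 2
--     return (n // 2, (n - 1) // 2)
-- ===== Notes on version B (the rewrite author's own statement) =====
-- stated objective: simpler
-- what changed: Replaced A's recursive self-calls with a single iterative while-loop over mutable (n, k), with the two k==1 base cases unified into one return (n//2, (n-1)//2) and the side selection done by the parity of the current k instead of A's decrement-then-test bookkeeping.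
import Mathlib
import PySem

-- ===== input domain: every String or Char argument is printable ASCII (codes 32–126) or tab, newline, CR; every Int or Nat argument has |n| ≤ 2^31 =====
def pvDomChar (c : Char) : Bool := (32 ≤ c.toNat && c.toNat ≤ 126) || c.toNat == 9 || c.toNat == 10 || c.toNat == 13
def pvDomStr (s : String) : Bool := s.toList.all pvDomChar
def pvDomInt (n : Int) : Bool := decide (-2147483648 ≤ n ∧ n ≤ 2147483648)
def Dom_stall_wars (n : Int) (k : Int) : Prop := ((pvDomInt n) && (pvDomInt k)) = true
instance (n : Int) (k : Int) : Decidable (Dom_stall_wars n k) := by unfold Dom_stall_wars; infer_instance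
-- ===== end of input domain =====

-- B replaces A's recursion with a while-loop over (n, k), with one unified base case
-- (n//2, (n-1)//2) and the side chosen by the parity of the CURRENT k (objective: simpler).

-- ===== PORT A =====
-- literal transliteration of A's recursion; fuel only makes the recursion total
-- (k strictly decreases each step, so fuel k.toNat + 1 is never exhausted when 1 ≤ k)
def stall_warsGo : Nat → Int → Int → Int × Int
  | 0, _, _ => (0, 0)  -- fuel exhausted (unreachable under Pre_)
  | fuel + 1, n, k =>
    if PySem.Int.mod n 2 = 0 then
      let left_space := PySem.Int.floordiv n 2 - 1
      let right_space := PySem.Int.floordiv n 2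
      if k = 1 then (right_space, left_space)
      else
        let k1 := k - 1  -- k -= 1 (place the middle person)
        if PySem.Int.mod k1 2 = 0 then
          stall_warsGo fuel left_space (PySem.Int.floordiv k1 2)
        else
          stall_warsGo fuel right_space (PySem.Int.floordiv (k1 + 1) 2)
    else
      let subproblem_size := PySem.Int.floordiv (n - 1) 2
      if k = 1 then (subproblem_size, subproblem_size)
      else
        let k1 := k - 1
        stall_warsGo fuel subproblem_size (PySem.Int.floordiv (k1 - 1) 2 + 1)

def stall_wars (n : Int) (k : Int) : Int × Int := stall_warsGo (k.toNat + 1) n k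

-- ===== PORT B =====
-- the while-loop of Source B as a tail-recursive step function over the mutable state (n, k)
def stall_warsAltLoop : Nat → Int → Int → Int × Int
  | 0, _, _ => (0, 0)  -- fuel exhausted (unreachable under Pre_)
  | fuel + 1, n, k =>
    if k ≠ 1 then
      if PySem.Int.mod n 2 = 0 then
        if PySem.Int.mod k 2 ≠ 0 then
          stall_warsAltLoop fuel (PySem.Int.floordiv n 2 - 1) (PySem.Int.floordiv (k - 1) 2)
        else
          stall_warsAltLoop fuel (PySem.Int.floordiv n 2) (PySem.Int.floordiv k 2)
      else
        stall_warsAltLoop fuel (PySem.Int.floordiv (n - 1) 2) (PySem.Int.floordiv k 2)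
    else
      (PySem.Int.floordiv n 2, PySem.Int.floordiv (n - 1) 2)

def stall_wars_alt (n : Int) (k : Int) : Int × Int := stall_warsAltLoop (k.toNat + 1) n k

-- ===== PRECONDITION & SPEC =====
-- A recurses forever (RecursionError) whenever k ≤ 0; it returns for every k ≥ 1.
def Pre_stall_wars (n : Int) (k : Int) : Prop := 1 ≤ k
instance (n : Int) (k : Int) : Decidable (Pre_stall_wars n k) := by unfold Pre_stall_wars; infer_instance
def pvWitness_stall_wars : Int × Int := (1000, 7)

def Spec_stall_wars (n : Int) (k : Int) (out : Int × Int) : Prop := out = stall_wars_alt n k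
instance (n : Int) (k : Int) (out : Int × Int) : Decidable (Spec_stall_wars n k out) := by unfold Spec_stall_wars; infer_instance

-- ===== CLAIM (what is proved, stated in full; the proofs are below) =====
def Claim_equal_stall_wars : Prop := ∀ (n : Int) (k : Int), Dom_stall_wars n k → Pre_stall_wars n k → Spec_stall_wars n k (stall_wars n k)

-- ===== LEMMAS AND PROOFS =====

-- the two step functions agree and shrink k identically: induction on fuel
theorem stall_warsGo_eq_alt (fuel : Nat) : ∀ (n k : Int), 1 ≤ k → k ≤ (fuel : Int) →
    stall_warsGo fuel n k = stall_warsAltLoop fuel n k := by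
  induction fuel with
  | zero => intro n k h1 h2; omega
  | succ f ih =>
    intro n k h1 h2
    have hfd : ∀ a : Int, PySem.Int.floordiv a 2 = a / 2 :=
      fun a => PySem.Int.floordiv_eq_ediv_of_pos (by norm_num)
    have hmd : ∀ a : Int, PySem.Int.mod a 2 = a % 2 :=
      fun a => PySem.Int.mod_eq_emod_of_pos (by norm_num)
    simp only [stall_warsGo, stall_warsAltLoop, hfd, hmd]
    split_ifs <;>
      first
        | omega
        | (simp only [Prod.mk.injEq, and_true, true_and]; omega)
        | (exact ih _ _ (by omega) (by omega))
        | (have e : k - 1 + 1 = k := by ring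
           rw [e]; exact ih _ _ (by omega) (by omega))
        | (have e : (k - 1 - 1) / 2 + 1 = k / 2 := by omega
           rw [e]; exact ih _ _ (by omega) (by omega))

-- ===== VERDICT (by name: the statement is the Claim_ definition above) =====
theorem stall_wars_spec : Claim_equal_stall_wars := by
  intro n k _ hk
  unfold Spec_stall_wars stall_wars stall_wars_alt
  exact stall_warsGo_eq_alt (k.toNat + 1) n k hk (by omega)
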